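-- pv_equiv track=rewrite | github.com/pypi-data/pypi-mirror-373 | packages/hilbert-quantization/hilbert_quantization-1.3.0-py3-none-any.whl/hilbert_quantization/core/dimension_calculator.py | _calculate_padding_positions
-- ===== SOURCE A (Python) =====
-- from typing import Tuple, List, Dict, Any
--
-- def _calculate_padding_positions(param_count: int, dimensions: Tuple[int, int]) -> List[Tuple[int, int]]:
--     """
--     Calculate positions where padding should be applied.
--
--     Padding is applied at the end of the parameter space in row-major order.
--
--     Args:
--         param_count: Number of actual parameters
--         dimensions: Target dimensions (width, height)
--
--     Returns:
--         List of (x, y) positions for padding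
--     """
--     width, height = dimensions
--     total_space = width * height
--     padding_count = total_space - param_count
--
--     padding_positions = []
--
--     # Calculate padding positions starting from the end in row-major order
--     for i in range(padding_count):
--         pos_index = total_space - 1 - i
--         y = pos_index // width
--         x = pos_index % width
--         padding_positions.append((x, y))
--
--     return padding_positions
-- ===== SOURCE B (Python) =====
-- def _calculate_padding_positions(param_count, dimensions):
--     """Walk grid coordinates directly in reverse row-major order; no index arithmetic."""
--     width, height = dimensions
--     padding_count = width * height - param_count
--     padding_positions = []
--     y = height - 1
--     while len(padding_positions) < padding_count:
--         for x in range(width - 1, -1, -1):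
--             if len(padding_positions) >= padding_count:
--                 break
--             padding_positions.append((x, y))
--         y -= 1
--     return padding_positions
-- ===== Notes on version B (the rewrite author's own statement) =====
-- stated objective: alternative
-- what changed: Replaces the flat-index loop with divmod arithmetic by a nested walk over grid coordinates (y descending, x descending) with an early exit once the padding count is reached, maintaining x and y directly with no // or % operations.
-- outside the precondition, e.g. on _calculate_padding_positions(-1, (0, 5)): A raises ZeroDivisionError, B does not finish within the time limit; on _calculate_padding_positions(-3, (-1, 1)): A returns [(0, 2), (0, 3)], B does not finish within the time limit
import Mathlib
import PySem

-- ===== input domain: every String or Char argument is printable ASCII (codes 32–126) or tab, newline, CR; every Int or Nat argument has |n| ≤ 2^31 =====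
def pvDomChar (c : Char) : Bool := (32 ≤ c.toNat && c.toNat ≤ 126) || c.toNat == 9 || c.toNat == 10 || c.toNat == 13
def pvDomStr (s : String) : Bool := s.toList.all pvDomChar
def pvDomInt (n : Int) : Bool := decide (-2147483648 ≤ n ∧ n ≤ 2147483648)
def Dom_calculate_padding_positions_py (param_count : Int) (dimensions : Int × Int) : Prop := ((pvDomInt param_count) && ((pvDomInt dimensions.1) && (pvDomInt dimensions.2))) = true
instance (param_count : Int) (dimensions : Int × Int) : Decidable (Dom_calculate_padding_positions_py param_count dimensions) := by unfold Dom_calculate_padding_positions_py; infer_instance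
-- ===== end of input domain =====

-- B replaces A's flat-index divmod loop by a direct nested walk over grid coordinates
-- (y then x, both descending) with an early-exit counter; alternative decomposition, same cost.


-- ===== PORT A =====
def calculate_padding_positions_py (param_count : Int) (dimensions : Int × Int) : List (Int × Int) :=
  let width := dimensions.1
  let height := dimensions.2
  let total_space := width * height
  let padding_count := total_space - param_count
  (PySem.List.pyRange 0 padding_count 1).foldl
    (fun acc i =>
      let pos_index := total_space - 1 - i
      let y := PySem.Int.floordiv pos_index width
      let x := PySem.Int.mod pos_index width
      acc ++ [(x, y)]) []

-- ===== PORT B =====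
-- inner 'for x in range(width-1, -1, -1)' loop; the counter r is the number of
-- positions still to append ('break' = the r = 0 branch doing nothing)
def pvB_inner (width y : Int) (st : List (Int × Int) × Nat) : List (Int × Int) × Nat :=
  (PySem.List.pyRange (width - 1) (-1) (-1)).foldl
    (fun st x =>
      match st with
      | (acc, 0) => (acc, 0)
      | (acc, r + 1) => (acc ++ [(x, y)], r))
    st

-- outer 'while' loop; fuel bounds the number of outer iterations (each one appends at
-- least one position while the precondition holds), making the recursion total
def pvB_outer (fuel : Nat) (width y : Int) (st : List (Int × Int) × Nat) : List (Int × Int) :=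
  match fuel with
  | 0 => st.1
  | fuel + 1 =>
    match st.2 with
    | 0 => st.1
    | _ => pvB_outer fuel width (y - 1) (pvB_inner width y st)

def calculate_padding_positions_py_alt (param_count : Int) (dimensions : Int × Int) : List (Int × Int) :=
  let width := dimensions.1
  let height := dimensions.2
  let padding_count := width * height - param_count
  pvB_outer padding_count.toNat width (height - 1) ([], padding_count.toNat)

-- ===== PRECONDITION & SPEC =====
-- Pre_ excludes inputs with non-positive width and positive padding count: there A raises
-- ZeroDivisionError (width = 0) or returns off-grid positions from floor division by a
-- negative width — outside the function's natural domain — while B's grid walk never terminates.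
def Pre_calculate_padding_positions_py (param_count : Int) (dimensions : Int × Int) : Prop :=
  1 ≤ dimensions.1 ∨ dimensions.1 * dimensions.2 - param_count ≤ 0
instance (param_count : Int) (dimensions : Int × Int) : Decidable (Pre_calculate_padding_positions_py param_count dimensions) := by unfold Pre_calculate_padding_positions_py; infer_instance

def pvWitness_calculate_padding_positions_py : Int × (Int × Int) := (3, (2, 3))

def Spec_calculate_padding_positions_py (param_count : Int) (dimensions : Int × Int) (out : List (Int × Int)) : Prop := out = calculate_padding_positions_py_alt param_count dimensions
instance (param_count : Int) (dimensions : Int × Int) (out : List (Int × Int)) : Decidable (Spec_calculate_padding_positions_py param_count dimensions out) := by unfold Spec_calculate_padding_positions_py; infer_instance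

-- ===== CLAIM (what is proved, stated in full; the proofs are below) =====
def Claim_equal_calculate_padding_positions_py : Prop := ∀ (param_count : Int) (dimensions : Int × Int), Dom_calculate_padding_positions_py param_count dimensions → Pre_calculate_padding_positions_py param_count dimensions → Spec_calculate_padding_positions_py param_count dimensions (calculate_padding_positions_py param_count dimensions)

-- ===== LEMMAS AND PROOFS =====

-- the list [(p % w, p // w), ((p-1) % w, (p-1) // w), …] of k pairs: both programs produce it
def pvPosPairs (w p : Int) (k : Nat) : List (Int × Int) :=
  match k with
  | 0 => []
  | k + 1 => (PySem.Int.mod p w, PySem.Int.floordiv p w) :: pvPosPairs w (p - 1) k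

theorem pvPosPairs_add (w p : Int) (k1 k2 : Nat) :
    pvPosPairs w p (k1 + k2) = pvPosPairs w p k1 ++ pvPosPairs w (p - k1) k2 := by
  induction k1 generalizing p with
  | zero => simp [pvPosPairs]
  | succ k ih =>
    have h : k + 1 + k2 = (k + k2) + 1 := by omega
    rw [h]
    simp only [pvPosPairs, ih (p - 1), List.cons_append]
    have h2 : p - 1 - (k : Int) = p - ((k : Int) + 1) := by omega
    rw [h2]
    push_cast
    ring_nf

theorem pvMapDesc (w : Int) :
    ∀ (k : Nat) (p : Int),
      (List.range k).map
        (fun t : Nat => (PySem.Int.mod (p - t) w, PySem.Int.floordiv (p - t) w))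
      = pvPosPairs w p k := by
  intro k
  induction k with
  | zero => intro p; simp [pvPosPairs]
  | succ k ih =>
    intro p
    rw [List.range_succ_eq_map, List.map_cons, List.map_map]
    simp only [pvPosPairs]
    congr 1
    · norm_num
    · rw [← ih (p - 1)]
      apply List.map_congr_left
      intro t _
      simp only [Function.comp]
      congr 2 <;> · push_cast; ring

theorem pvFloordiv_row (w y x : Int) (hw : 0 < w) (hx0 : 0 ≤ x) (hxw : x < w) :
    PySem.Int.floordiv (y * w + x) w = y := by
  rw [PySem.Int.floordiv_eq_iff_of_pos hw]
  constructor <;> nlinarith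

theorem pvMod_row (w y x : Int) (hw : 0 < w) (hx0 : 0 ≤ x) (hxw : x < w) :
    PySem.Int.mod (y * w + x) w = x := by
  have h := PySem.Int.floordiv_mul_add_mod (y * w + x) w
  rw [pvFloordiv_row w y x hw hx0 hxw] at h
  omega

-- a run of k positions inside row y, starting at x and going left
theorem pvPosPairs_row (w y : Int) (hw : 0 < w) :
    ∀ (k : Nat) (x : Int), 0 ≤ x → x < w → (k : Int) ≤ x + 1 →
      pvPosPairs w (y * w + x) k = (List.range k).map (fun t : Nat => (x - (t : Int), y)) := by
  intro k
  induction k with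
  | zero => intro x _ _ _; simp [pvPosPairs]
  | succ k ih =>
    intro x hx0 hxw hk
    rw [List.range_succ_eq_map, List.map_cons, List.map_map]
    simp only [pvPosPairs]
    congr 1
    · rw [pvMod_row w y x hw hx0 hxw, pvFloordiv_row w y x hw hx0 hxw]
      norm_num
    · cases k with
      | zero => simp [pvPosPairs]
      | succ m =>
        have hx1 : 0 ≤ x - 1 := by push_cast at hk; omega
        have hp : y * w + x - 1 = y * w + (x - 1) := by ring
        rw [hp, ih (x - 1) hx1 (by omega) (by push_cast at hk; omega)]
        apply List.map_congr_left
        intro t _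
        simp only [Function.comp]
        congr 1
        push_cast
        ring

-- A's foldl equals pvPosPairs
theorem pvA_eq (param_count : Int) (dimensions : Int × Int) :
    calculate_padding_positions_py param_count dimensions =
      pvPosPairs dimensions.1 (dimensions.1 * dimensions.2 - 1)
        (dimensions.1 * dimensions.2 - param_count).toNat := by
  unfold calculate_padding_positions_py
  rw [PySem.List.foldl_append_singleton_eq_map]
  simp only [List.nil_append]
  rw [PySem.List.pyRange_one]
  simp only [Int.sub_zero, List.map_map]
  rw [← pvMapDesc _ _ (dimensions.1 * dimensions.2 - 1)]
  apply List.map_congr_left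
  intro t _
  simp only [Function.comp]
  congr 2 <;> · push_cast; ring

-- the inner fold appends (take r) of the x-list and decrements the counter by its length
theorem pvInner_fold (y : Int) (xs : List Int) :
    ∀ (acc : List (Int × Int)) (r : Nat),
      xs.foldl (fun st x =>
        match st with
        | (acc, 0) => (acc, 0)
        | (acc, r + 1) => (acc ++ [(x, y)], r)) (acc, r)
      = (acc ++ (xs.take r).map (fun x => (x, y)), r - xs.length) := by
  induction xs with
  | nil => intro acc r; simp
  | cons x xs ih =>
    intro acc r
    cases r with
    | zero =>
      simp only [List.foldl_cons]
      rw [ih acc 0]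
      simp
    | succ m =>
      simp only [List.foldl_cons]
      rw [ih (acc ++ [(x, y)]) m]
      simp [List.take_succ_cons, List.length_cons]

-- the countdown range is the descending x-list
theorem pvRow_list (w : Int) (hw : 0 < w) :
    PySem.List.pyRange (w - 1) (-1) (-1)
      = (List.range w.toNat).map (fun k : Nat => w - 1 - (k : Int)) := by
  rw [PySem.List.pyRange_neg_one]
  have h : (w - 1 - (-1)).toNat = w.toNat := by omega
  rw [h]

-- outer loop invariant: with fuel ≥ rem and positive width, the walk emits pvPosPairs
theorem pvOuter_spec (w : Int) (hw : 0 < w) :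
    ∀ (fuel rem : Nat) (y : Int) (acc : List (Int × Int)), rem ≤ fuel →
      pvB_outer fuel w y (acc, rem) = acc ++ pvPosPairs w (y * w + (w - 1)) rem := by
  intro fuel
  induction fuel with
  | zero =>
    intro rem y acc h
    interval_cases rem
    simp [pvB_outer, pvPosPairs]
  | succ f ih =>
    intro rem y acc h
    cases rem with
    | zero => simp [pvB_outer, pvPosPairs]
    | succ m =>
      show pvB_outer f w (y - 1) (pvB_inner w y (acc, m + 1)) = _
      unfold pvB_inner
      rw [pvRow_list w hw, pvInner_fold]
      have hlen : ((List.range w.toNat).map (fun k : Nat => w - 1 - (k : Int))).length = w.toNat := by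
        simp
      rw [hlen]
      rw [ih (m + 1 - w.toNat) (y - 1) _ (by omega)]
      rw [List.append_assoc]
      congr 1
      have hcast : (w.toNat : Int) = w := by omega
      by_cases hle : m + 1 ≤ w.toNat
      · -- the whole remainder fits in this row
        have h0 : m + 1 - w.toNat = 0 := by omega
        rw [h0]
        have hz : ∀ p : Int, pvPosPairs w p 0 = [] := fun _ => rfl
        simp only [hz, List.append_nil]
        rw [← List.map_take, List.take_range, Nat.min_eq_left hle]
        rw [pvPosPairs_row w y hw (m + 1) (w - 1) (by omega) (by omega) (by push_cast; omega)]
        simp only [List.map_map]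
        apply List.map_congr_left
        intro t _
        simp only [Function.comp]
      · -- a full row is emitted, the rest continues at y - 1
        have hsplit : pvPosPairs w (y * w + (w - 1)) (m + 1)
            = pvPosPairs w (y * w + (w - 1)) w.toNat
              ++ pvPosPairs w (y * w + (w - 1) - w.toNat) (m + 1 - w.toNat) := by
          rw [← pvPosPairs_add]
          congr 1
          omega
        rw [hsplit]
        congr 1
        · rw [List.take_of_length_le (by simp; omega)]
          rw [pvPosPairs_row w y hw w.toNat (w - 1) (by omega) (by omega) (by omega)]
          simp only [List.map_map]
          apply List.map_congr_left
          intro t _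
          simp only [Function.comp]
        · congr 1
          rw [hcast]
          ring

-- ===== VERDICT (by name: the statement is the Claim_ definition above) =====
theorem calculate_padding_positions_py_spec : Claim_equal_calculate_padding_positions_py := by
  intro param_count dimensions _ hpre
  unfold Pre_calculate_padding_positions_py at hpre
  unfold Spec_calculate_padding_positions_py
  rw [pvA_eq]
  unfold calculate_padding_positions_py_alt
  simp only []
  set w := dimensions.1
  set h := dimensions.2
  set n := w * h - param_count with hn
  by_cases hpos : 0 < n
  · have hw : 0 < w := by
      rcases hpre with hw1 | hle
      · omega
      · omega
    rw [pvOuter_spec w hw n.toNat n.toNat (h - 1) [] le_rfl]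
    simp only [List.nil_append]
    congr 1
    ring
  · have : n.toNat = 0 := by omega
    rw [this]
    simp [pvB_outer, pvPosPairs]
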